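-- pv_equiv track=rewrite | github.com/JaeYaNe/practice_codingTest | pg_76501.py | solution
-- ===== SOURCE A (Python) =====
-- def solution(absolutes, signs):
--     answer = 0
--
--     n = len(absolutes)
--     for i in range(n):
--         if(signs[i]) :
--             answer += absolutes[i]
--         else :
--             answer -= absolutes[i]
--
--     return answer
-- ===== SOURCE B (Python) =====
-- def solution(absolutes, signs):
--     total = sum(absolutes)
--     neg = sum(a for a, s in zip(absolutes, signs) if not s)
--     return total - 2 * neg
-- ===== Notes on version B (the rewrite author's own statement) =====
-- stated objective: alternative
-- what changed: Replaces the single index-driven signed accumulator with two differently-shaped passes: a full sum of absolutes and a zip-filtered sum of the negatively-signed ones, returning total - 2*neg.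
import Mathlib
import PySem

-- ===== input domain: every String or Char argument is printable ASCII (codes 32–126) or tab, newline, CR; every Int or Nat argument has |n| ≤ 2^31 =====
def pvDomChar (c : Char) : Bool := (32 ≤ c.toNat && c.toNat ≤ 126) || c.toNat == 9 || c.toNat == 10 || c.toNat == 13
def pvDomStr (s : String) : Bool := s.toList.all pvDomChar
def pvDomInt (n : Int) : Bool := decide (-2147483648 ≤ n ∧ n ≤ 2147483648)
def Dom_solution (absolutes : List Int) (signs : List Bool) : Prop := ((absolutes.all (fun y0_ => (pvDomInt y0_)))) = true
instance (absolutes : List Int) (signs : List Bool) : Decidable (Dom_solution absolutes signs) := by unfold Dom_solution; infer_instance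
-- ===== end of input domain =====

-- B replaces A's index-driven signed accumulator with a full sum plus a zip-filtered
-- negative-subset sum (total - 2*neg): an alternative decomposition, same cost.


-- ===== PORT A =====
-- for i in range(n): answer ± absolutes[i] according to signs[i]; indexing is exact under Pre_
def solution (absolutes : List Int) (signs : List Bool) : Int :=
  (PySem.List.pyRange 0 (absolutes.length : Int) 1).foldl
    (fun answer i =>
      if PySem.List.pyGetD signs i false then
        answer + PySem.List.pyGetD absolutes i 0
      else
        answer - PySem.List.pyGetD absolutes i 0) 0

-- ===== PORT B =====
def solution_alt (absolutes : List Int) (signs : List Bool) : Int :=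
  let total := absolutes.foldl (· + ·) 0
  let neg := (absolutes.zip signs).foldl (fun acc p => if !p.2 then acc + p.1 else acc) 0
  total - 2 * neg

-- ===== PRECONDITION & SPEC =====
-- A indexes signs[i] for every i < len(absolutes), so it raises IndexError when signs is shorter.
def Pre_solution (absolutes : List Int) (signs : List Bool) : Prop :=
  absolutes.length ≤ signs.length
instance (absolutes : List Int) (signs : List Bool) : Decidable (Pre_solution absolutes signs) := by
  unfold Pre_solution; infer_instance

def pvWitness_solution : List Int × List Bool := ([4, 7, 12], [true, false, true])

def Spec_solution (absolutes : List Int) (signs : List Bool) (out : Int) : Prop :=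
  out = solution_alt absolutes signs
instance (absolutes : List Int) (signs : List Bool) (out : Int) : Decidable (Spec_solution absolutes signs out) := by
  unfold Spec_solution; infer_instance

-- ===== CLAIM (what is proved, stated in full; the proofs are below) =====
def Claim_equal_solution : Prop := ∀ (absolutes : List Int) (signs : List Bool), Dom_solution absolutes signs → Pre_solution absolutes signs → Spec_solution absolutes signs (solution absolutes signs)


-- ===== LEMMAS AND PROOFS =====

-- structural signed sum, the common reference point of both ports
def sAux : List Int → List Bool → Int
  | [], _ => 0
  | _, [] => 0
  | a :: t, s :: st => (if s then a else -a) + sAux t st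

lemma sum_foldl_acc (l : List Int) : ∀ acc : Int, l.foldl (· + ·) acc = acc + l.foldl (· + ·) 0 := by
  induction l with
  | nil => intro acc; simp
  | cons a t ih =>
      intro acc
      simp only [List.foldl_cons]
      rw [ih (acc + a), ih (0 + a)]
      ring

lemma neg_foldl_acc (l : List (Int × Bool)) :
    ∀ acc : Int, l.foldl (fun acc p => if !p.2 then acc + p.1 else acc) acc
      = acc + l.foldl (fun acc p => if !p.2 then acc + p.1 else acc) 0 := by
  induction l with
  | nil => intro acc; simp
  | cons a t ih =>
      intro acc
      obtain ⟨x, s⟩ := a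
      cases s
      · simp only [List.foldl_cons]
        rw [show (if (!false) = true then acc + x else acc) = acc + x from rfl,
            show (if (!false) = true then (0 : Int) + x else 0) = 0 + x from rfl]
        rw [ih (acc + x), ih (0 + x)]
        ring
      · simp only [List.foldl_cons]
        rw [show (if (!true) = true then acc + x else acc) = acc from rfl,
            show (if (!true) = true then (0 : Int) + x else 0) = 0 from rfl]
        exact ih acc

lemma alt_eq_sAux (absolutes : List Int) : ∀ signs : List Bool,
    absolutes.length ≤ signs.length →
    solution_alt absolutes signs = sAux absolutes signs := by
  induction absolutes with
  | nil => intro signs _; cases signs <;> simp [solution_alt, sAux]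
  | cons a t ih =>
      intro signs h
      cases signs with
      | nil => simp at h
      | cons s st =>
          simp only [List.length_cons, Nat.add_le_add_iff_right] at h
          have ht := ih st h
          simp only [solution_alt] at ht
          simp only [solution_alt, List.zip_cons_cons, List.foldl_cons, sAux]
          rw [sum_foldl_acc t (0 + a)]
          cases s
          · rw [show (if (!false) = true then (0 : Int) + a else 0) = 0 + a from rfl,
                show (if false = true then a else -a) = -a from rfl]
            rw [neg_foldl_acc (t.zip st) (0 + a), ← ht]
            ring
          · rw [show (if (!true) = true then (0 : Int) + a else 0) = 0 from rfl,
                show (if true = true then a else -a) = a from rfl]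
            rw [← ht]
            ring

-- A's range-loop, generalized over an already-processed prefix of both lists
lemma a_loop (absolutes : List Int) : ∀ (signs pres : List Bool) (pre : List Int) (acc : Int),
    absolutes.length ≤ signs.length → pre.length = pres.length →
    (PySem.List.pyRange (pre.length : Int) ((pre.length : Int) + (absolutes.length : Int)) 1).foldl
      (fun answer i =>
        if PySem.List.pyGetD (pres ++ signs) i false then
          answer + PySem.List.pyGetD (pre ++ absolutes) i 0
        else
          answer - PySem.List.pyGetD (pre ++ absolutes) i 0) acc
      = acc + sAux absolutes signs := by
  induction absolutes with
  | nil =>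
      intro signs pres pre acc _ _
      rw [PySem.List.pyRange_one_eq_nil (by simp)]
      simp only [List.foldl_nil]
      cases signs <;> simp [sAux]
  | cons a t ih =>
      intro signs pres pre acc h hlen
      cases signs with
      | nil => simp at h
      | cons s st =>
          simp only [List.length_cons, Nat.add_le_add_iff_right] at h
          rw [PySem.List.pyRange_one_cons (by simp)]
          simp only [List.foldl_cons]
          have hget_a : PySem.List.pyGetD (pre ++ a :: t) ((pre.length : Nat) : Int) 0 = a := by
            rw [PySem.List.pyGetD_natCast]
            simp [List.getD_eq_getElem?_getD]
          have hget_s : PySem.List.pyGetD (pres ++ s :: st) ((pre.length : Nat) : Int) false = s := by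
            rw [PySem.List.pyGetD_natCast, hlen]
            simp [List.getD_eq_getElem?_getD]
          rw [hget_a, hget_s]
          rw [show ((pre.length : Int) + 1) = (((pre ++ [a]).length : Nat) : Int) by simp,
              show ((pre.length : Int) + ((a :: t).length : Int)) =
                (((pre ++ [a]).length : Nat) : Int) + ((t.length : Nat) : Int) by simp; ring,
              show pre ++ a :: t = (pre ++ [a]) ++ t by simp,
              show pres ++ s :: st = (pres ++ [s]) ++ st by simp]
          cases s
          · rw [if_neg (by simp)]
            rw [ih st (pres ++ [false]) (pre ++ [a]) (acc - a) h (by simp [hlen])]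
            simp only [sAux]
            rw [show (if false = true then a else -a) = -a from rfl]
            ring
          · rw [if_pos rfl]
            rw [ih st (pres ++ [true]) (pre ++ [a]) (acc + a) h (by simp [hlen])]
            simp only [sAux]
            norm_num
            ring

lemma a_eq_sAux (absolutes : List Int) (signs : List Bool)
    (h : absolutes.length ≤ signs.length) :
    solution absolutes signs = sAux absolutes signs := by
  have h0 := a_loop absolutes signs [] [] 0 h rfl
  simp only [List.length_nil, Nat.cast_zero, zero_add, List.nil_append] at h0
  rw [solution, h0]

-- ===== VERDICT (by name: the statement is the Claim_ definition above) =====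
theorem solution_spec : Claim_equal_solution := by
  intro absolutes signs _ hpre
  unfold Spec_solution
  rw [a_eq_sAux absolutes signs hpre, alt_eq_sAux absolutes signs hpre]
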